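-- pv_equiv track=rewrite | github.com/marymhu/Project_Euler | euler_17.py | number_letter_count
-- ===== SOURCE A (Python) =====
-- def number_letter_count (max_num):
--     under_20 = ['one', 'two', 'three', 'four', 'five', 'six', 'seven', 'eight', 'nine', 'ten', 'eleven', 'twelve', 'thirteen', 'fourteen', 'fifteen', 'sixteen', 'seventeen', 'eighteen', 'nineteen']
--     multiple_ten = ['twenty', 'thirty', 'forty', 'fifty', 'sixty', 'seventy', 'eighty', 'ninety']
--     letter_sum = 0
--     for i in range (1, max_num + 1):
--         units = i%10
--         tens = (i//10) % 10
--         hundreds = (i//100) % 10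
--
--         str_num = ""
--         if i == 1000:
--             str_num += "one" + "thousand"
--         else:
--             if hundreds != 0:
--                 str_num += under_20[hundreds - 1] + "hundred"
--                 if i%100 != 0:
--                     str_num += "and"
--             if i%100 != 0:
--                 if tens < 2:
--                     str_num += under_20[i%100 - 1]
--                 else:
--                     str_num += multiple_ten[tens - 2]
--                     if units != 0:
--                         str_num += under_20[units - 1]
--         letter_sum += len(str_num)
--     return letter_sum
-- ===== SOURCE B (Python) =====
-- _UNDER = [3, 3, 5, 4, 4, 3, 5, 5, 4, 3, 6, 6, 8, 8, 7, 7, 9, 8, 8]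
-- _TENS = [6, 6, 5, 5, 5, 7, 6, 6]
--
--
-- def _letters(j):
--     u = j % 10
--     t = (j // 10) % 10
--     h = j // 100
--     total = 0
--     if h != 0:
--         total += _UNDER[h - 1] + 7
--         if j % 100 != 0:
--             total += 3
--     if j % 100 != 0:
--         if t < 2:
--             total += _UNDER[j % 100 - 1]
--         else:
--             total += _TENS[t - 2]
--             if u != 0:
--                 total += _UNDER[u - 1]
--     return total
--
--
-- _TABLE = [_letters(j) for j in range(1000)]
-- _SUM = sum(_TABLE)
--
--
-- def number_letter_count(max_num):
--     if max_num < 1: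
--         return 0
--     r = max_num % 1000
--     total = (max_num // 1000) * _SUM + sum(_TABLE[1:r + 1])
--     if max_num >= 1000:
--         total += 11
--     return total
-- ===== Notes on version B (the rewrite author's own statement) =====
-- stated objective: faster
-- what changed: Replaces the per-number loop that builds each number word with a fixed 1000-entry per-residue letter-count table; the answer is full-blocks-times-table-sum plus a sliced prefix sum plus a one-off 11 for 'onethousand', O(1) arithmetic after the fixed precompute.
import Mathlib
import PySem

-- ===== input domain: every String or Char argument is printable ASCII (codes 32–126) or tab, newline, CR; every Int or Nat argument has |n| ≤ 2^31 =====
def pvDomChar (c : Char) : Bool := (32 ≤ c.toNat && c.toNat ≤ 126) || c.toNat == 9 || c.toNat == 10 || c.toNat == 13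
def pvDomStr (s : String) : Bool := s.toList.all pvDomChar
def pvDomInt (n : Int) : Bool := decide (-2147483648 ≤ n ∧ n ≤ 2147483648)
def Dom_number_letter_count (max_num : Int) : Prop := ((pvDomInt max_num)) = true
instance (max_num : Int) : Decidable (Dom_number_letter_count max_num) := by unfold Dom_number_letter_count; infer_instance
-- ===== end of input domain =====

-- B replaces A's per-number word-building loop by a fixed 1000-entry per-residue letter-count
-- table: full blocks are aggregated by multiplication, the remainder by a sliced prefix sum,
-- plus a one-off 11 for "onethousand" (objective: faster — constant arithmetic after the
-- fixed-size precompute instead of a loop over max_num numbers).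

-- ===== PORT A =====
def pvUnder20 : List String :=
  ["one", "two", "three", "four", "five", "six", "seven", "eight", "nine", "ten",
   "eleven", "twelve", "thirteen", "fourteen", "fifteen", "sixteen", "seventeen",
   "eighteen", "nineteen"]

def pvMultipleTen : List String :=
  ["twenty", "thirty", "forty", "fifty", "sixty", "seventy", "eighty", "ninety"]

-- the string A builds for one value of i (the loop body); indexing via pyGetD is exact:
-- every index A uses is in range for every Int i
def pvStrNum (i : Int) : String :=
  let units := PySem.Int.mod i 10
  let tens := PySem.Int.mod (PySem.Int.floordiv i 10) 10
  let hundreds := PySem.Int.mod (PySem.Int.floordiv i 100) 10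
  if i = 1000 then
    "one" ++ "thousand"
  else
    let s : String := ""
    let s := if hundreds ≠ 0 then
        (s ++ PySem.List.pyGetD pvUnder20 (hundreds - 1) "" ++ "hundred")
          ++ (if PySem.Int.mod i 100 ≠ 0 then "and" else "")
      else s
    if PySem.Int.mod i 100 ≠ 0 then
      if tens < 2 then
        s ++ PySem.List.pyGetD pvUnder20 (PySem.Int.mod i 100 - 1) ""
      else
        (s ++ PySem.List.pyGetD pvMultipleTen (tens - 2) "")
          ++ (if units ≠ 0 then PySem.List.pyGetD pvUnder20 (units - 1) "" else "")
    else s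

def number_letter_count (max_num : Int) : Int :=
  (PySem.List.pyRange 1 (max_num + 1) 1).foldl
    (fun letter_sum i => letter_sum + PySem.Str.len (pvStrNum i)) 0

-- ===== PORT B =====
def pvUnderLen : List Int := [3, 3, 5, 4, 4, 3, 5, 5, 4, 3, 6, 6, 8, 8, 7, 7, 9, 8, 8]
def pvTensLen : List Int := [6, 6, 5, 5, 5, 7, 6, 6]

def pvLetters (j : Int) : Int :=
  let u := PySem.Int.mod j 10
  let t := PySem.Int.mod (PySem.Int.floordiv j 10) 10
  let h := PySem.Int.floordiv j 100
  let total : Int := 0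
  let total := if h ≠ 0 then
      total + PySem.List.pyGetD pvUnderLen (h - 1) 0 + 7
        + (if PySem.Int.mod j 100 ≠ 0 then 3 else 0)
    else total
  if PySem.Int.mod j 100 ≠ 0 then
    if t < 2 then
      total + PySem.List.pyGetD pvUnderLen (PySem.Int.mod j 100 - 1) 0
    else
      total + PySem.List.pyGetD pvTensLen (t - 2) 0
        + (if u ≠ 0 then PySem.List.pyGetD pvUnderLen (u - 1) 0 else 0)
  else total

def pvTable : List Int := (PySem.List.pyRange 0 1000 1).map pvLetters
def pvSum : Int := pvTable.sum

def number_letter_count_alt (max_num : Int) : Int :=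
  if max_num < 1 then 0
  else
    let r := PySem.Int.mod max_num 1000
    let total := PySem.Int.floordiv max_num 1000 * pvSum
      + (PySem.List.slice pvTable (some 1) (some (r + 1))).sum
    if max_num ≥ 1000 then total + 11 else total

-- ===== PRECONDITION & SPEC =====
def Spec_number_letter_count (max_num : Int) (out : Int) : Prop := out = number_letter_count_alt max_num
instance (max_num : Int) (out : Int) : Decidable (Spec_number_letter_count max_num out) := by unfold Spec_number_letter_count; infer_instance

-- ===== CLAIM (what is proved, stated in full; the proofs are below) =====
def Claim_equal_number_letter_count : Prop := ∀ (max_num : Int), Dom_number_letter_count max_num → Spec_number_letter_count max_num (number_letter_count max_num)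

-- ===== LEMMAS AND PROOFS =====

-- lengths of the word-list entries are B's table lists, entry by entry
theorem pv_len_under (k : Int) (h0 : 0 ≤ k) (h1 : k < 19) :
    PySem.Str.len (PySem.List.pyGetD pvUnder20 k "") = PySem.List.pyGetD pvUnderLen k 0 := by
  have h : ∀ k ∈ PySem.List.pyRange 0 19 1,
      PySem.Str.len (PySem.List.pyGetD pvUnder20 k "") = PySem.List.pyGetD pvUnderLen k 0 := by decide
  exact h k (by rw [PySem.List.mem_pyRange_one]; omega)

theorem pv_len_tens (k : Int) (h0 : 0 ≤ k) (h1 : k < 8) :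
    PySem.Str.len (PySem.List.pyGetD pvMultipleTen k "") = PySem.List.pyGetD pvTensLen k 0 := by
  have h : ∀ k ∈ PySem.List.pyRange 0 8 1,
      PySem.Str.len (PySem.List.pyGetD pvMultipleTen k "") = PySem.List.pyGetD pvTensLen k 0 := by decide
  exact h k (by rw [PySem.List.mem_pyRange_one]; omega)

theorem pv_len_1000 : PySem.Str.len (pvStrNum 1000) = 11 := by decide

theorem pv_letters_zero : pvLetters 0 = 0 := by decide

-- away from the special case i = 1000, A's word length for i is B's table function at i % 1000:
-- the digit quantities factor through i % 1000 and the branches coincide, length by length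
theorem pv_len_eq_letters_mod (i : Int) (hi : i ≠ 1000) :
    PySem.Str.len (pvStrNum i) = pvLetters (i % 1000) := by
  have h10 : (0:Int) < 10 := by norm_num
  have h100 : (0:Int) < 100 := by norm_num
  unfold pvStrNum pvLetters
  simp only [PySem.Int.mod_eq_emod_of_pos h10, PySem.Int.mod_eq_emod_of_pos h100,
    PySem.Int.floordiv_eq_ediv_of_pos h10, PySem.Int.floordiv_eq_ediv_of_pos h100]
  rw [show (i % 1000) % 10 = i % 10 by omega,
      show (i % 1000) % 100 = i % 100 by omega,
      show (i % 1000) / 10 % 10 = i / 10 % 10 by omega,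
      show (i % 1000) / 100 = i / 100 % 10 by omega]
  rw [if_neg hi]
  split_ifs with c1 c2 c3 c4 c5 c6 c7 <;>
    (try simp only [PySem.Str.len_append]) <;>
    (try rw [pv_len_under (i / 100 % 10 - 1) (by omega) (by omega)]) <;>
    (try rw [pv_len_under (i % 100 - 1) (by omega) (by omega)]) <;>
    (try rw [pv_len_tens (i / 10 % 10 - 2) (by omega) (by omega)]) <;>
    (try rw [pv_len_under (i % 10 - 1) (by omega) (by omega)]) <;>
    (try simp [PySem.Str.len])

set_option maxRecDepth 8192 in
set_option maxHeartbeats 1000000 in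
theorem pv_table_len : pvTable.length = 1000 := by decide

theorem pv_table_get (r : Int) (h0 : 0 ≤ r) (h1 : r < 1000) :
    PySem.List.pyGetD pvTable r 0 = pvLetters r :=
  PySem.List.pyGetD_map_pyRange_of_nonneg pvLetters 1000 r 0 h0 h1

-- prefix-sum step: extending the slice by one adds the table entry
theorem pv_prefix_step (r : Int) (h0 : 1 ≤ r) (h1 : r ≤ 999) :
    (PySem.List.slice pvTable (some 1) (some (r + 1))).sum
      = (PySem.List.slice pvTable (some 1) (some r)).sum + pvLetters r := by
  have hlen : pvTable.length = 1000 := pv_table_len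
  have hget : pvTable[r.toNat]'(by rw [pv_table_len]; omega) = pvLetters r := by
    rw [← PySem.List.pyGetD_eq_getElem pvTable 0 (by omega : (0:Int) ≤ r) (by rw [pv_table_len]; omega)]
    exact pv_table_get r (by omega) (by omega)
  rw [PySem.List.slice_toNat pvTable (by norm_num) (by omega),
      PySem.List.slice_toNat pvTable (by norm_num) (by omega)]
  simp only [Int.toNat_one]
  rw [show (r + 1).toNat - 1 = (r.toNat - 1) + 1 by omega,
      List.take_add_one, List.sum_append]
  rw [List.getElem?_drop]
  rw [show 1 + (r.toNat - 1) = r.toNat by omega]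
  rw [List.getElem?_eq_getElem (by rw [pv_table_len]; omega), hget]
  simp

-- full-block identity: the whole-table sum is the sum over residues 1..999 (residue 0 weighs 0)
set_option maxRecDepth 8192 in
set_option maxHeartbeats 2000000 in
theorem pv_sum_eq_full_prefix :
    pvSum = (PySem.List.slice pvTable (some 1) (some 1000)).sum := by decide

set_option maxRecDepth 8192 in
set_option maxHeartbeats 2000000 in
theorem pv_prefix_one : (PySem.List.slice pvTable (some 1) (some (0 + 1))).sum = 0 := by decide

-- one step of B's closed form
theorem pv_alt_step (N : Int) (hN : 1 ≤ N) :
    number_letter_count_alt (N + 1)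
      = number_letter_count_alt N + PySem.Str.len (pvStrNum (N + 1)) := by
  have h1000 : (0:Int) < 1000 := by norm_num
  unfold number_letter_count_alt
  rw [if_neg (by omega : ¬ N + 1 < 1), if_neg (by omega : ¬ N < 1)]
  simp only [PySem.Int.mod_eq_emod_of_pos h1000, PySem.Int.floordiv_eq_ediv_of_pos h1000]
  by_cases hr : (N + 1) % 1000 = 0
  · -- N + 1 is a multiple of 1000
    have hq : (N + 1) / 1000 = N / 1000 + 1 := by omega
    have hNr : N % 1000 = 999 := by omega
    rw [hq, hNr, hr, pv_prefix_one]
    rw [show (999 : Int) + 1 = 1000 from rfl, ← pv_sum_eq_full_prefix]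
    by_cases h1k : N + 1 = 1000
    · rw [show PySem.Str.len (pvStrNum (N + 1)) = 11 by rw [h1k]; exact pv_len_1000]
      rw [if_pos (by omega : N + 1 ≥ 1000), if_neg (by omega : ¬ N ≥ 1000)]
      have : N / 1000 = 0 := by omega
      rw [this]; ring
    · have hA : PySem.Str.len (pvStrNum (N + 1)) = pvLetters ((N + 1) % 1000) :=
        pv_len_eq_letters_mod _ h1k
      rw [hA, hr, pv_letters_zero]
      rw [if_pos (by omega : N + 1 ≥ 1000), if_pos (by omega : N ≥ 1000)]
      ring
  · -- within a block
    have hq : (N + 1) / 1000 = N / 1000 := by omega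
    have hNr : N % 1000 = (N + 1) % 1000 - 1 := by omega
    have hA : PySem.Str.len (pvStrNum (N + 1)) = pvLetters ((N + 1) % 1000) :=
      pv_len_eq_letters_mod _ (by omega)
    rw [hq, hNr, hA]
    rw [show (N + 1) % 1000 - 1 + 1 = (N + 1) % 1000 by ring]
    rw [pv_prefix_step _ (by omega) (by omega)]
    by_cases hge : N + 1 ≥ 1000
    · rw [if_pos hge, if_pos (by omega : N ≥ 1000)]; ring
    · rw [if_neg hge, if_neg (by omega : ¬ N ≥ 1000)]; ring

-- one step of A's loop
theorem pv_a_step (N : Int) (hN : 0 ≤ N) :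
    number_letter_count (N + 1)
      = number_letter_count N + PySem.Str.len (pvStrNum (N + 1)) := by
  unfold number_letter_count
  rw [PySem.List.pyRange_one_succ_right (by omega : (1:Int) ≤ N + 1), List.foldl_append]
  rfl

set_option maxRecDepth 8192 in
set_option maxHeartbeats 2000000 in
theorem pv_main (N : Int) : number_letter_count N = number_letter_count_alt N := by
  rcases le_or_gt N 0 with h | h
  · unfold number_letter_count number_letter_count_alt
    rw [PySem.List.pyRange_one_eq_nil (by omega), if_pos (by omega)]
    rfl
  · obtain ⟨n, rfl⟩ : ∃ n : Nat, N = 1 + (n : Int) := ⟨(N - 1).toNat, by omega⟩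
    clear h
    induction n with
    | zero => decide
    | succ m ih =>
      rw [show (1 : Int) + ((m + 1 : Nat) : Int) = (1 + (m : Int)) + 1 by push_cast; ring]
      rw [pv_a_step _ (by omega), pv_alt_step _ (by omega), ih]

-- ===== VERDICT (by name: the statement is the Claim_ definition above) =====
theorem number_letter_count_spec : Claim_equal_number_letter_count := by
  intro max_num _
  unfold Spec_number_letter_count
  exact pv_main max_num
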